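-- pv_equiv track=rewrite | github.com/paul-hyun/transformer-evolution | gpt/data.py | create_pretrain_instances
-- ===== SOURCE A (Python) =====
-- def create_pretrain_instances(doc, n_seq):
--     # for [BOS], [EOS]
--     max_seq = n_seq - 2
--     tgt_seq = max_seq
--
--     instances = []
--     current_chunk = []
--     current_length = 0
--     for i in range(len(doc)):
--         current_chunk.append(doc[i]) # line
--         current_length += len(doc[i])
--         if i == len(doc) - 1 or current_length >= tgt_seq:
--             if 0 < len(current_chunk):
--                 tokens = []
--                 for chunk in current_chunk: tokens.extend(chunk)
--                 tokens = tokens[:tgt_seq]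
--                 if 1 < len(tokens):
--                     instance = {
--                         "tokens": ["[BOS]"] + tokens + ["[EOS]"],
--                     }
--                     instances.append(instance)
--             current_chunk = []
--             current_length = 0
--     return instances
-- ===== SOURCE B (Python) =====
-- def create_pretrain_instances(doc, n_seq):
--     tgt_seq = n_seq - 2
--     n = len(doc)
--     # prefix sums of line lengths: pre[k] = total tokens in doc[:k]
--     pre = [0]
--     for line in doc:
--         pre.append(pre[-1] + len(line))
--     instances = []
--     b = 0
--     while b < n:
--         # binary-search the first j in [b, n-1] whose chunk doc[b:j+1] reaches
--         # tgt_seq tokens (pre is nondecreasing); defaults to n-1 if none does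
--         lo, hi = b, n - 1
--         while lo < hi:
--             mid = (lo + hi) // 2
--             if pre[mid + 1] - pre[b] >= tgt_seq:
--                 hi = mid
--             else:
--                 lo = mid + 1
--         tokens = [t for line in doc[b:lo + 1] for t in line][:tgt_seq]
--         if len(tokens) > 1:
--             instances.append({"tokens": ["[BOS]"] + tokens + ["[EOS]"]})
--         b = lo + 1
--     return instances
-- ===== Notes on version B (the rewrite author's own statement) =====
-- stated objective: alternative
-- what changed: Replaces A's single accumulate-and-flush scan (growing a current_chunk list and resetting a running length) by a prefix-sum array built once plus a binary search over it for each chunk's boundary, slicing the chunk out of doc directly.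
import Mathlib
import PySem

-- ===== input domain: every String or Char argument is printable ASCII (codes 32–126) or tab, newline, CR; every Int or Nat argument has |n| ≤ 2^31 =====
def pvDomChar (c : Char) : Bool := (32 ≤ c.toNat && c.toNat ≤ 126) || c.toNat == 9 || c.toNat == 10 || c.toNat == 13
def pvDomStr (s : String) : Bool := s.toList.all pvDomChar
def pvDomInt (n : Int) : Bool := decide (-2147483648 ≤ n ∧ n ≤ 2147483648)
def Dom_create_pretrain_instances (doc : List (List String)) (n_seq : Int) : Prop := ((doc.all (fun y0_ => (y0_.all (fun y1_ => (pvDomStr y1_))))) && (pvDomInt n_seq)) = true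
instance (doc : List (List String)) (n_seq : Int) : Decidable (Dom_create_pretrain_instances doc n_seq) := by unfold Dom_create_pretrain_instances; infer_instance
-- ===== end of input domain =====

-- B replaces A's single accumulate-and-flush scan by prefix sums plus a binary search
-- for each chunk boundary (alternative algorithm; same observable result).


-- ===== PORT A =====
-- A's loop: state (instances, current_chunk, current_length); flush (build instance) in place.
def cpiLoopA (n tgt : Int) : List (Int × List String) → List (List (String × List String)) → List (List String) → Int → List (List (String × List String))
  | [], ins, _, _ => ins
  | (i, line) :: rest, ins, cur, len =>
    let cur' := cur ++ [line]
    let len' := len + (line.length : Int)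
    if i == n - 1 || len' ≥ tgt then
      let ins' :=
        if 0 < cur'.length then
          -- tokens = []; for chunk in current_chunk: tokens.extend(chunk)
          let tokens := cur'.foldl (· ++ ·) []
          let tokens := PySem.List.slice tokens none (some tgt)
          if 1 < tokens.length then ins ++ [[("tokens", ["[BOS]"] ++ tokens ++ ["[EOS]"])]] else ins
        else ins
      cpiLoopA n tgt rest ins' [] 0
    else cpiLoopA n tgt rest ins cur' len'

def create_pretrain_instances (doc : List (List String)) (n_seq : Int) : List (List (String × List String)) :=
  let max_seq := n_seq - 2
  let tgt_seq := max_seq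
  cpiLoopA (doc.length : Int) tgt_seq (PySem.List.enumerate doc 0) [] [] 0

-- ===== PORT B =====
-- pre = [0]; for line in doc: pre.append(pre[-1] + len(line))
def cpiPreLoop : List (List String) → List Int → List Int
  | [], pre => pre
  | line :: rest, pre => cpiPreLoop rest (pre ++ [PySem.List.pyGetD pre (-1) 0 + (line.length : Int)])

-- inner while: binary search for the first crossing index in [lo, hi]
-- (fuel-guarded structural recursion: fuel bounds the iteration count, the loop logic is unchanged)
def cpiBSLoop (pre : List Int) (b tgt : Int) : Nat → Int → Int → Int
  | 0, lo, _ => lo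
  | fuel + 1, lo, hi =>
    if lo < hi then
      let mid := PySem.Int.floordiv (lo + hi) 2
      if PySem.List.pyGetD pre (mid + 1) 0 - PySem.List.pyGetD pre b 0 ≥ tgt then
        cpiBSLoop pre b tgt fuel lo mid
      else cpiBSLoop pre b tgt fuel (mid + 1) hi
    else lo

-- outer while over chunk starts b (fuel-guarded likewise)
def cpiOuter (doc : List (List String)) (pre : List Int) (tgt : Int) :
    Nat → List (List (String × List String)) → Int → List (List (String × List String))
  | 0, instances, _ => instances
  | fuel + 1, instances, b =>
    if b < (doc.length : Int) then
      let lo := cpiBSLoop pre b tgt (((doc.length : Int) - 1 - b).toNat) b ((doc.length : Int) - 1)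
      let tokens := PySem.List.slice (PySem.List.slice doc (some b) (some (lo + 1))).flatten none (some tgt)
      let instances' := if 1 < tokens.length then instances ++ [[("tokens", ["[BOS]"] ++ tokens ++ ["[EOS]"])]] else instances
      cpiOuter doc pre tgt fuel instances' (lo + 1)
    else instances

def create_pretrain_instances_alt (doc : List (List String)) (n_seq : Int) : List (List (String × List String)) :=
  let tgt_seq := n_seq - 2
  let pre := cpiPreLoop doc [0]
  cpiOuter doc pre tgt_seq (doc.length + 1) [] 0

-- ===== PRECONDITION & SPEC =====
def Spec_create_pretrain_instances (doc : List (List String)) (n_seq : Int) (out : List (List (String × List String))) : Prop := out = create_pretrain_instances_alt doc n_seq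
instance (doc : List (List String)) (n_seq : Int) (out : List (List (String × List String))) : Decidable (Spec_create_pretrain_instances doc n_seq out) := by unfold Spec_create_pretrain_instances; infer_instance

-- ===== CLAIM (what is proved, stated in full; the proofs are below) =====
def Claim_equal_create_pretrain_instances : Prop := ∀ (doc : List (List String)) (n_seq : Int), Dom_create_pretrain_instances doc n_seq → Spec_create_pretrain_instances doc n_seq (create_pretrain_instances doc n_seq)

-- ===== LEMMAS AND PROOFS =====

-- tokens built by repeated extend = flatten
theorem cpi_foldl_append_eq_flatten (l : List (List String)) (acc : List String) :
    l.foldl (· ++ ·) acc = acc ++ l.flatten := by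
  induction l generalizing acc with
  | nil => simp
  | cons x xs ih => simp [List.foldl, ih]

-- the per-chunk instance(s)
def cpiInst (tgt : Int) (chunk : List (List String)) : List (List (String × List String)) :=
  let tokens := PySem.List.slice chunk.flatten none (some tgt)
  if 1 < tokens.length then [[("tokens", ["[BOS]"] ++ tokens ++ ["[EOS]"])]] else []

-- chunk-grouping view of A's loop
def cpiChunks (n tgt : Int) : List (Int × List String) → List (List (List String)) → List (List String) → Int → List (List (List String))
  | [], chunks, _, _ => chunks
  | (i, line) :: rest, chunks, cur, tot =>
    let cur' := cur ++ [line]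
    let tot' := tot + (line.length : Int)
    if tot' ≥ tgt || i == n - 1 then cpiChunks n tgt rest (chunks ++ [cur']) [] 0
    else cpiChunks n tgt rest chunks cur' tot'

theorem cpiChunks_acc (n tgt : Int) (l : List (Int × List String)) (chunks : List (List (List String)))
    (cur : List (List String)) (tot : Int) :
    cpiChunks n tgt l chunks cur tot = chunks ++ cpiChunks n tgt l [] cur tot := by
  induction l generalizing chunks cur tot with
  | nil => simp [cpiChunks]
  | cons p rest ih =>
    obtain ⟨i, line⟩ := p
    simp only [cpiChunks]
    split
    · simp only [List.nil_append]
      rw [ih (chunks ++ [cur ++ [line]]), ih [cur ++ [line]]]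
      simp
    · exact ih chunks _ _

-- A's loop = instances so far ++ instances built from the chunks
theorem cpi_main (n tgt : Int) (l : List (Int × List String)) (ins : List (List (String × List String)))
    (cur : List (List String)) (len : Int) :
    cpiLoopA n tgt l ins cur len = ins ++ (cpiChunks n tgt l [] cur len).flatMap (cpiInst tgt) := by
  induction l generalizing ins cur len with
  | nil => simp [cpiLoopA, cpiChunks]
  | cons p rest ih =>
    obtain ⟨i, line⟩ := p
    simp only [cpiLoopA, cpiChunks]
    have hcond : (i == n - 1 || len + (line.length : Int) ≥ tgt)
        = (len + (line.length : Int) ≥ tgt || i == n - 1) := Bool.or_comm _ _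
    rw [hcond]
    split
    · simp only [List.nil_append]
      rw [ih, cpiChunks_acc n tgt rest [cur ++ [line]]]
      have hpos : 0 < (cur ++ [line]).length := by simp
      simp only [if_pos hpos, cpi_foldl_append_eq_flatten, List.nil_append,
        List.flatMap_append, List.flatMap_cons, List.flatMap_nil, List.append_nil, cpiInst]
      split <;> simp
    · exact ih ins _ _

-- ---- token-count prefix sums ----
def cpiSN (l : List (List String)) : Nat := (l.map List.length).sum
def cpiS (l : List (List String)) : Int := (cpiSN l : Int)

theorem cpiSN_take_mono (l : List (List String)) : ∀ k k' : Nat, k ≤ k' →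
    cpiSN (l.take k) ≤ cpiSN (l.take k') := by
  induction l with
  | nil => intro k k' _; simp
  | cons x xs ih =>
    intro k k' h
    cases k with
    | zero => simp [cpiSN]
    | succ k =>
      cases k' with
      | zero => omega
      | succ k' => simp only [List.take_succ_cons, cpiSN, List.map_cons, List.sum_cons]
                   have := ih k k' (by omega)
                   simp only [cpiSN] at this; omega

-- ---- the value of the pre list ----
def cpiPreSpec (c : Int) : List (List String) → List Int
  | [] => []
  | line :: rest => (c + (line.length : Int)) :: cpiPreSpec (c + (line.length : Int)) rest

theorem cpiPreLoop_eq : ∀ (l : List (List String)) (pre : List Int), pre ≠ [] →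
    cpiPreLoop l pre = pre ++ cpiPreSpec (PySem.List.pyGetD pre (-1) 0) l := by
  intro l
  induction l with
  | nil => intro pre _; simp [cpiPreLoop, cpiPreSpec]
  | cons line rest ih =>
    intro pre hpre
    simp only [cpiPreLoop]
    rw [ih _ (by simp), PySem.List.pyGetD_neg_one_append_singleton]
    simp [cpiPreSpec]

theorem cpiPreSpec_getD : ∀ (l : List (List String)) (c : Int) (k : Nat), k ≤ l.length →
    (c :: cpiPreSpec c l).getD k 0 = c + cpiS (l.take k) := by
  intro l
  induction l with
  | nil =>
    intro c k hk
    have hk0 : k = 0 := by simpa using hk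
    subst hk0; simp [cpiS, cpiSN]
  | cons line rest ih =>
    intro c k hk
    cases k with
    | zero => simp [cpiS, cpiSN]
    | succ k =>
      simp only [List.getD_cons_succ, cpiPreSpec]
      have := ih (c + (line.length : Int)) k (by simpa using hk)
      rw [this]
      simp [cpiS, cpiSN]; omega

theorem cpi_pre_get (doc : List (List String)) (i : Int) (h0 : 0 ≤ i) (h1 : i ≤ (doc.length : Int)) :
    PySem.List.pyGetD (cpiPreLoop doc [0]) i 0 = cpiS (doc.take i.toNat) := by
  rw [cpiPreLoop_eq doc [0] (by simp)]
  have h : PySem.List.pyGetD ([0] : List Int) (-1) 0 = 0 := by decide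
  rw [h]
  have hi : i = ((i.toNat : Nat) : Int) := by omega
  rw [hi, PySem.List.pyGetD_natCast]
  have : ([0] : List Int) ++ cpiPreSpec 0 doc = 0 :: cpiPreSpec 0 doc := by simp
  rw [this, cpiPreSpec_getD doc 0 i.toNat (by omega)]
  have hmax : max i 0 = i := by omega
  simp [hmax]

-- ---- the split index of the first chunk ----
def cpiM (tgt : Int) (tot : Int) : List (List String) → Nat
  | [] => 0
  | [_] => 0
  | line :: r :: rest =>
    if tot + (line.length : Int) ≥ tgt then 0
    else cpiM tgt (tot + (line.length : Int)) (r :: rest) + 1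

theorem cpiM_spec (tgt : Int) : ∀ (l : List (List String)) (tot : Int), l ≠ [] →
    cpiM tgt tot l ≤ l.length - 1 ∧
    (∀ k : Nat, k < cpiM tgt tot l → ¬(tot + cpiS (l.take (k+1)) ≥ tgt)) ∧
    (cpiM tgt tot l = l.length - 1 ∨ tot + cpiS (l.take (cpiM tgt tot l + 1)) ≥ tgt) := by
  intro l
  induction l with
  | nil => intro tot h; exact absurd rfl h
  | cons line rest ih =>
    intro tot _
    cases rest with
    | nil =>
      refine ⟨by simp [cpiM], by simp [cpiM], Or.inl (by simp [cpiM])⟩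
    | cons r rr =>
      by_cases hc : tot + (line.length : Int) ≥ tgt
      · refine ⟨by simp [cpiM, hc], by simp [cpiM, hc], Or.inr ?_⟩
        simp [cpiM, hc, cpiS, cpiSN]
      · obtain ⟨ih1, ih2, ih3⟩ := ih (tot + (line.length : Int)) (by simp)
        have hm : cpiM tgt tot (line :: r :: rr) = cpiM tgt (tot + (line.length : Int)) (r :: rr) + 1 := by
          simp [cpiM, hc]
        have ih1' : cpiM tgt (tot + (line.length : Int)) (r :: rr) ≤ rr.length := by
          simpa using ih1
        refine ⟨by rw [hm]; simp only [List.length_cons]; omega, ?_, ?_⟩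
        · intro k hk
          rw [hm] at hk
          cases k with
          | zero => simpa [cpiS, cpiSN] using hc
          | succ k =>
            have := ih2 k (by omega)
            simp only [List.take_succ_cons, cpiS, cpiSN, List.map_cons, List.sum_cons] at *
            push_cast at *
            omega
        · rw [hm]
          rcases ih3 with h | h
          · left; simp [h]
          · right
            simp only [List.take_succ_cons, cpiS, cpiSN, List.map_cons, List.sum_cons] at *
            push_cast at *
            omega

-- any two indices satisfying the first-crossing characterisation agree
theorem cpi_first_unique {P : Nat → Prop} {L m1 m2 : Nat}
    (h1a : m1 ≤ L - 1) (h1b : ∀ k, k < m1 → ¬P k) (h1c : m1 = L - 1 ∨ P m1)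
    (h2a : m2 ≤ L - 1) (h2b : ∀ k, k < m2 → ¬P k) (h2c : m2 = L - 1 ∨ P m2) : m1 = m2 := by
  rcases Nat.lt_trichotomy m1 m2 with h | h | h
  · have := h2b m1 h
    rcases h1c with h' | h'
    · omega
    · exact absurd h' this
  · exact h
  · have := h1b m2 h
    rcases h2c with h' | h'
    · omega
    · exact absurd h' this

-- ---- binary-search correctness ----
theorem cpiBSLoop_spec (doc : List (List String)) (tgt b : Int)
    (cond : Int → Prop) [DecidablePred cond]
    (hcond : ∀ j : Int, b ≤ j → j ≤ (doc.length : Int) - 1 →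
      (cond j ↔ PySem.List.pyGetD (cpiPreLoop doc [0]) (j + 1) 0 - PySem.List.pyGetD (cpiPreLoop doc [0]) b 0 ≥ tgt))
    (hmono : ∀ i j : Int, b ≤ i → i ≤ j → j ≤ (doc.length : Int) - 1 → cond i → cond j) :
    ∀ (fuel : Nat) (lo hi : Int), (hi - lo).toNat ≤ fuel → b ≤ lo → lo ≤ hi → hi ≤ (doc.length : Int) - 1 →
    (∀ j : Int, b ≤ j → j < lo → ¬cond j) →
    (hi = (doc.length : Int) - 1 ∨ cond hi) →
    b ≤ cpiBSLoop (cpiPreLoop doc [0]) b tgt fuel lo hi ∧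
    cpiBSLoop (cpiPreLoop doc [0]) b tgt fuel lo hi ≤ (doc.length : Int) - 1 ∧
    (∀ j : Int, b ≤ j → j < cpiBSLoop (cpiPreLoop doc [0]) b tgt fuel lo hi → ¬cond j) ∧
    (cpiBSLoop (cpiPreLoop doc [0]) b tgt fuel lo hi = (doc.length : Int) - 1 ∨
      cond (cpiBSLoop (cpiPreLoop doc [0]) b tgt fuel lo hi)) := by
  intro fuel
  induction fuel with
  | zero =>
    intro lo hi hfuel hblo hlohi hhi hgap hright
    have hlh : lo = hi := by omega
    subst hlh
    simp only [cpiBSLoop]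
    exact ⟨hblo, by omega, hgap, hright⟩
  | succ fuel ih =>
    intro lo hi hfuel hblo hlohi hhi hgap hright
    by_cases hlh : lo < hi
    · rw [cpiBSLoop, if_pos hlh]
      have h1 : lo * 2 ≤ lo + hi := by omega
      have h2 : lo + hi < hi * 2 := by omega
      have hlo : lo ≤ PySem.Int.floordiv (lo + hi) 2 :=
        (PySem.Int.le_floordiv_iff_mul_le (by omega)).mpr h1
      have hhm : PySem.Int.floordiv (lo + hi) 2 < hi :=
        (PySem.Int.floordiv_lt_iff_lt_mul (by omega)).mpr h2
      by_cases hc : PySem.List.pyGetD (cpiPreLoop doc [0]) (PySem.Int.floordiv (lo + hi) 2 + 1) 0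
          - PySem.List.pyGetD (cpiPreLoop doc [0]) b 0 ≥ tgt
      · rw [if_pos hc]
        have hcm : cond (PySem.Int.floordiv (lo + hi) 2) :=
          (hcond _ (by omega) (by omega)).mpr hc
        exact ih lo (PySem.Int.floordiv (lo + hi) 2) (by omega) hblo (by omega) (by omega) hgap (Or.inr hcm)
      · rw [if_neg hc]
        have hcm : ¬cond (PySem.Int.floordiv (lo + hi) 2) := fun hcm =>
          hc ((hcond _ (by omega) (by omega)).mp hcm)
        refine ih (PySem.Int.floordiv (lo + hi) 2 + 1) hi (by omega) (by omega) (by omega) hhi ?_ hright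
        intro j hbj hj
        by_cases hjlo : j < lo
        · exact hgap j hbj hjlo
        · intro hcj
          exact hcm (hmono j (PySem.Int.floordiv (lo + hi) 2) (by omega) (by omega) (by omega) hcj)
    · rw [cpiBSLoop, if_neg hlh]
      have hlheq : lo = hi := by omega
      subst hlheq
      exact ⟨hblo, by omega, hgap, hright⟩

-- the binary search lands exactly on b + (split index of doc.drop b)
theorem cpiS_append (a b : List (List String)) : cpiS (a ++ b) = cpiS a + cpiS b := by
  simp [cpiS, cpiSN]

-- cpiS over a take of the drop
theorem cpiS_take_drop (doc : List (List String)) (b' k : Nat) :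
    cpiS (doc.take (b' + k)) = cpiS (doc.take b') + cpiS ((doc.drop b').take k) := by
  rw [List.take_add, cpiS_append]

theorem cpiBS_exact (doc : List (List String)) (tgt : Int) (b' : Nat) (hb : b' < doc.length) :
    cpiBSLoop (cpiPreLoop doc [0]) (b' : Int) tgt (((doc.length : Int) - 1 - (b' : Int)).toNat) (b' : Int) ((doc.length : Int) - 1)
      = (b' : Int) + (cpiM tgt 0 (doc.drop b') : Int) := by
  set l := doc.drop b' with hl
  have hlne : l ≠ [] := by
    rw [hl]
    intro hcontra
    have := congrArg List.length hcontra
    simp at this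
    omega
  have hspec := cpiBSLoop_spec doc tgt (b' : Int)
    (fun j => tgt ≤ cpiS (doc.take (j + 1).toNat) - cpiS (doc.take b'))
    (fun j hbj hjn => by
      have e1 : PySem.List.pyGetD (cpiPreLoop doc [0]) (j + 1) 0 = cpiS (doc.take (j + 1).toNat) :=
        cpi_pre_get doc (j + 1) (by omega) (by omega)
      have e2 : PySem.List.pyGetD (cpiPreLoop doc [0]) (b' : Int) 0 = cpiS (doc.take b') := by
        have := cpi_pre_get doc (b' : Int) (by omega) (by omega)
        simpa using this
      rw [e1, e2])
    (fun i j hbi hij hjn hci => by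
      have hmono := cpiSN_take_mono doc (i + 1).toNat (j + 1).toNat (by omega)
      simp only [cpiS] at *
      omega)
    (((doc.length : Int) - 1 - (b' : Int)).toNat) (b' : Int) ((doc.length : Int) - 1)
    (by omega) (by omega) (by omega) (by omega)
    (fun j h1 h2 => absurd h1 (by omega)) (Or.inl rfl)
  obtain ⟨hr1, hr2, hr3, hr4⟩ := hspec
  set r := cpiBSLoop (cpiPreLoop doc [0]) (b' : Int) tgt (((doc.length : Int) - 1 - (b' : Int)).toNat) (b' : Int) ((doc.length : Int) - 1) with hr
  set m2 : Nat := (r - (b' : Int)).toNat with hm2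
  have hrm2 : r = (b' : Int) + (m2 : Int) := by omega
  -- translate: for a Nat offset k, cond ↑(b' + k) ↔ tgt ≤ cpiS (l.take (k + 1))
  have htrans : ∀ k : Nat, (tgt ≤ cpiS (doc.take (((b' + k : Nat) : Int) + 1).toNat) - cpiS (doc.take b'))
      ↔ tgt ≤ cpiS (l.take (k + 1)) := by
    intro k
    have h1 : (((b' + k : Nat) : Int) + 1).toNat = b' + (k + 1) := by omega
    rw [h1, cpiS_take_drop doc b' (k + 1), ← hl]
    constructor <;> intro h <;> omega
  have hL : l.length = doc.length - b' := by rw [hl]; simp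
  obtain ⟨hma, hmb, hmc⟩ := cpiM_spec tgt l 0 hlne
  -- the two characterisations coincide
  have huniq : cpiM tgt 0 l = m2 := by
    refine cpi_first_unique (P := fun k => tgt ≤ cpiS (l.take (k + 1))) (L := l.length)
      hma (fun k hk => by have := hmb k hk; omega) ?_ (by omega) ?_ ?_
    · rcases hmc with h | h
      · exact Or.inl h
      · exact Or.inr (by omega)
    · intro k hk
      have hj := hr3 ((b' + k : Nat) : Int) (by omega) (by omega)
      intro hP
      exact hj ((htrans k).mpr hP)
    · rcases hr4 with h | h
      · left; omega
      · right
        have : r = ((b' + m2 : Nat) : Int) := by omega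
        rw [this] at h
        exact (htrans m2).mp h
  omega

-- ---- B-shaped chunking ----
def cpiChunksB (tgt : Int) : List (List String) → List (List String) → Int → List (List (List String))
  | [], _, _ => []
  | line :: rest, cur, tot =>
    (cur ++ (line :: rest).take (cpiM tgt tot (line :: rest) + 1)) ::
      cpiChunksB tgt ((line :: rest).drop (cpiM tgt tot (line :: rest) + 1)) [] 0
termination_by l => l.length
decreasing_by simp

theorem cpiChunksB_cons (tgt : Int) (line : List String) (rest cur : List (List String)) (tot : Int) :
    cpiChunksB tgt (line :: rest) cur tot
      = (cur ++ (line :: rest).take (cpiM tgt tot (line :: rest) + 1)) ::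
          cpiChunksB tgt ((line :: rest).drop (cpiM tgt tot (line :: rest) + 1)) [] 0 := by
  rw [cpiChunksB]

-- A's chunks are B's chunks
theorem cpi_chunks_eq (tgt : Int) : ∀ (l : List (List String)) (s : Int) (cur : List (List String)) (tot : Int),
    cpiChunks (s + (l.length : Int)) tgt (PySem.List.enumerate l s) [] cur tot = cpiChunksB tgt l cur tot := by
  intro l
  induction l with
  | nil => intro s cur tot; simp [PySem.List.enumerate, cpiChunks, cpiChunksB]
  | cons line rest ih =>
    intro s cur tot
    rw [PySem.List.enumerate_cons]
    cases rest with
    | nil =>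
      simp only [cpiChunks, List.length_cons]
      simp [cpiChunks, cpiChunksB, cpiM]
    | cons r rr =>
      simp only [cpiChunks, List.length_cons]
      have hn2 : s + ((rr.length + 1 + 1 : Nat) : Int) = (s + 1) + ((r :: rr).length : Int) := by
        simp only [List.length_cons]; push_cast; ring
      by_cases hc : tot + (line.length : Int) ≥ tgt
      · have hdec : decide (tot + (line.length : Int) ≥ tgt) = true := by simp [hc]
        simp only [hdec, Bool.true_or, if_true]
        rw [cpiChunks_acc, hn2, ih (s + 1) [] 0]
        have hm : cpiM tgt tot (line :: r :: rr) = 0 := by simp [cpiM, hc]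
        simp [cpiChunksB, hm]
      · have hdec : decide (tot + (line.length : Int) ≥ tgt) = false := by simp [hc]
        simp only [hdec, Bool.false_or]
        have hbeq2 : (s == s + ((rr.length + 1 + 1 : Nat) : Int) - 1) = false := by
          simp only [beq_eq_false_iff_ne]
          push_cast
          omega
        rw [hbeq2, if_neg (by simp), hn2, ih (s + 1) (cur ++ [line]) (tot + (line.length : Int))]
        have hm : cpiM tgt tot (line :: r :: rr) = cpiM tgt (tot + (line.length : Int)) (r :: rr) + 1 := by
          simp [cpiM, hc]
        conv_rhs => rw [cpiChunksB_cons]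
        simp only [hm]
        have htake : (line :: r :: rr).take (cpiM tgt (tot + (line.length : Int)) (r :: rr) + 1 + 1)
            = line :: (r :: rr).take (cpiM tgt (tot + (line.length : Int)) (r :: rr) + 1) := by
          simp [List.take_succ_cons]
        have hdrop : (line :: r :: rr).drop (cpiM tgt (tot + (line.length : Int)) (r :: rr) + 1 + 1)
            = (r :: rr).drop (cpiM tgt (tot + (line.length : Int)) (r :: rr) + 1) := by
          simp [List.drop_succ_cons]
        rw [htake, hdrop, cpiChunksB_cons tgt r rr (cur ++ [line]) (tot + (line.length : Int))]
        simp

-- B's outer loop = instances from B's chunks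
theorem cpi_outer_eq (doc : List (List String)) (tgt : Int) : ∀ (fuel : Nat) (b' : Nat)
    (out : List (List (String × List String))), doc.length - b' < fuel → b' ≤ doc.length →
    cpiOuter doc (cpiPreLoop doc [0]) tgt fuel out (b' : Int)
      = out ++ (cpiChunksB tgt (doc.drop b') [] 0).flatMap (cpiInst tgt) := by
  intro fuel
  induction fuel with
  | zero =>
    intro b' out hfuel hble
    omega
  | succ fuel ih =>
    intro b' out hfuel hble
    by_cases hb : b' < doc.length
    · rw [cpiOuter, if_pos (by exact_mod_cast hb)]
      dsimp only []
      set l := doc.drop b' with hl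
      set m : Nat := cpiM tgt 0 l with hm
      have hbs := cpiBS_exact doc tgt b' hb
      rw [← hl, ← hm] at hbs
      have hlne : l ≠ [] := by
        rw [hl]; intro hcontra
        have := congrArg List.length hcontra
        simp at this; omega
      have hL : l.length = doc.length - b' := by rw [hl]; simp
      have hma := (cpiM_spec tgt l 0 hlne).1
      rw [← hm] at hma
      -- the chunk slice
      have hslice : PySem.List.slice doc (some ((b' : Nat) : Int))
          (some (cpiBSLoop (cpiPreLoop doc [0]) (b' : Int) tgt (((doc.length : Int) - 1 - (b' : Int)).toNat) (b' : Int) ((doc.length : Int) - 1) + 1))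
          = l.take (m + 1) := by
        rw [hbs]
        have : ((b' : Nat) : Int) + (m : Int) + 1 = ((b' : Nat) : Int) + (((m + 1 : Nat) : Nat) : Int) := by
          push_cast; ring
        rw [this, PySem.List.slice_natCast_add, ← hl]
      rw [hslice, hbs]
      -- the recursive call
      have hstep : ((b' : Nat) : Int) + (m : Int) + 1 = (((b' + m + 1 : Nat) : Nat) : Int) := by
        push_cast; ring
      rw [hstep]
      have hrec := ih (b' + m + 1) (if 1 < (PySem.List.slice (l.take (m + 1)).flatten none (some tgt)).length
          then out ++ [[("tokens", ["[BOS]"] ++ PySem.List.slice (l.take (m + 1)).flatten none (some tgt) ++ ["[EOS]"])]]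
          else out) (by omega) (by omega)
      rw [hrec]
      have hdrop : doc.drop (b' + m + 1) = l.drop (m + 1) := by
        rw [hl, List.drop_drop]
        congr 1
      rw [hdrop]
      -- unfold one chunk on the right
      obtain ⟨line, rest, hcons⟩ := List.exists_cons_of_ne_nil hlne
      conv_rhs => rw [hcons, cpiChunksB_cons]
      rw [← hcons, ← hm]
      simp only [List.nil_append, List.flatMap_cons]
      rw [show cpiChunksB tgt (l.drop (m + 1)) [] 0 = cpiChunksB tgt ((line :: rest).drop (cpiM tgt 0 (line :: rest) + 1)) [] 0 by rw [← hcons, ← hm]]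
      rw [← hcons, ← hm]
      unfold cpiInst
      split <;> rename_i hcond' <;> simp [hcond']
    · have hbe : b' = doc.length := by omega
      subst hbe
      rw [cpiOuter, if_neg (by omega)]
      simp [cpiChunksB]

-- ===== VERDICT (by name: the statement is the Claim_ definition above) =====
theorem create_pretrain_instances_spec : Claim_equal_create_pretrain_instances := by
  intro doc n_seq _
  unfold Spec_create_pretrain_instances create_pretrain_instances create_pretrain_instances_alt
  rw [cpi_main]
  have h := cpi_chunks_eq (n_seq - 2) doc 0 [] 0
  simp only [zero_add] at h
  rw [h]
  have h2 := cpi_outer_eq doc (n_seq - 2) (doc.length + 1) 0 [] (by omega) (by omega)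
  simp only [Nat.cast_zero, List.drop_zero, List.nil_append] at h2
  rw [h2]
  simp
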